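-- pv_equiv track=rewrite | github.com/rtverhey-cmd/skinsignal | app.py | count_intent
-- ===== SOURCE A (Python) =====
-- INTENT_PHRASES = [
--
--     # ── PURCHASE INTENT (original) ──
--     "where to buy", "where can i buy", "where do i buy",
--     "where can i find", "link?", "asin?", "amazon link",
--     "just ordered", "just bought", "just purchased",
--     "in my cart", "added to cart", "is this on amazon",
--     "sephora link", "ulta link", "where did you get",
--     "what's the amazon link", "how do i get this",
--
--     # ── HOLY GRAIL / RECOMMENDATION RECURSION ──
--     # These are the strongest early signals per intelligence doc
--     "holy grail", "hg product", "holy grail product",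
--     "repurchased", "repurchase", "on my third bottle",
--     "on my second bottle", "reordered", "auto ship",
--     "saved my skin", "changed my skin", "life changing",
--     "nothing else works", "only thing that works",
--     "game changer", "game-changer",
--     "everyone should use", "everyone needs this",
--     "i was influenced", "tiktok made me buy",
--     "reddit made me buy", "saw it on reddit",
--     "everyone keeps mentioning", "always recommended",
--     "constantly recommended", "staple in my routine",
--     "never going back", "cant live without",
--     "can't live without",
--
--     # ── CONTROVERSY / POLARIZATION SIGNALS ──
--     # Intelligence doc: polarization creates discussion velocity
--     "overhyped", "over hyped", "is it worth it",
--     "worth the hype", "lives up to the hype",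
--     "fake reviews", "counterfeit", "dupe",
--     "ruined my skin", "broke me out",
--     "holy grail or scam", "scam or legit",
--
--     # ── AVAILABILITY SIGNALS ──
--     "sold out", "back in stock", "sold out everywhere",
--     "can't find it", "where is it in stock",
-- ]
--
-- def count_intent(comments):
--     """
--     Count purchase intent AND holy grail signals.
--     Intelligence doc: recommendation recursion is the #1 early signal.
--     """
--     count = 0
--     for comment in comments:
--         body = comment.lower()
--         for phrase in INTENT_PHRASES:
--             if phrase in body:
--                 count += 1
--                 break
--     return count
-- ===== SOURCE B (Python) =====
-- # B: phrases kept as delimiter-joined blobs (one per block of the original list),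
-- # split at load time and indexed by first character; each comment is scanned
-- # position by position (position-major) instead of phrase by phrase.
--
-- _PHRASE_BLOBS = (
--     "where to buy|where can i buy|where do i buy|where can i find|link?|asin?|"
--     "amazon link|just ordered|just bought|just purchased|in my cart|"
--     "added to cart|is this on amazon|sephora link|ulta link|where did you get|"
--     "what's the amazon link|how do i get this",
--     "holy grail|hg product|holy grail product|repurchased|repurchase|"
--     "on my third bottle|on my second bottle|reordered|auto ship|saved my skin|"
--     "changed my skin|life changing|nothing else works|only thing that works|"
--     "game changer",
--     "game-changer|everyone should use|everyone needs this|i was influenced|"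
--     "tiktok made me buy|reddit made me buy|saw it on reddit|"
--     "everyone keeps mentioning|always recommended|constantly recommended|"
--     "staple in my routine|never going back|cant live without|can't live without",
--     "overhyped|over hyped|is it worth it|worth the hype|lives up to the hype|"
--     "fake reviews|counterfeit|dupe|ruined my skin|broke me out|"
--     "holy grail or scam|scam or legit",
--     "sold out|back in stock|sold out everywhere|can't find it|where is it in stock",
-- )
--
-- _BUCKETS = {}
-- for _blob in _PHRASE_BLOBS:
--     for _p in _blob.split("|"):
--         _BUCKETS.setdefault(_p[0], []).append(_p)
--
--
-- def count_intent(comments):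
--     total = 0
--     for comment in comments:
--         body = comment.lower()
--         for j in range(len(body)):
--             if any(body.startswith(p, j) for p in _BUCKETS.get(body[j], ())):
--                 total += 1
--                 break
--     return total
-- ===== Notes on version B (the rewrite author's own statement) =====
-- stated objective: alternative
-- what changed: B stores the phrases as one delimiter-joined blob split at load time into a dict of buckets keyed by first character, then scans each comment position by position testing only the phrases that can start there, instead of A's one full substring search per phrase.
import Mathlib
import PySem

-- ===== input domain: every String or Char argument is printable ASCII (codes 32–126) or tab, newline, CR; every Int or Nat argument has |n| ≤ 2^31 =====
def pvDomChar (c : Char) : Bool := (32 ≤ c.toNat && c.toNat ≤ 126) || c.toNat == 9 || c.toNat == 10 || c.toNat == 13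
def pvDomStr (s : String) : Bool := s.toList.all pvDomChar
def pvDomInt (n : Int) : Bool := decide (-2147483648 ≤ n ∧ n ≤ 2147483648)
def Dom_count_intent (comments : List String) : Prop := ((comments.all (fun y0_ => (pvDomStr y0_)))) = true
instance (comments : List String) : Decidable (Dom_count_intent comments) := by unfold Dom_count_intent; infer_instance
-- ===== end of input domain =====

-- B keeps the phrases as one delimiter-joined blob split at load time into first-character
-- buckets and scans each comment position by position (objective: alternative; no speed claim).

-- ===== PORT A =====
def INTENT_PHRASES : List String := [
    "where to buy", "where can i buy", "where do i buy",
    "where can i find", "link?", "asin?", "amazon link",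
    "just ordered", "just bought", "just purchased",
    "in my cart", "added to cart", "is this on amazon",
    "sephora link", "ulta link", "where did you get",
    "what's the amazon link", "how do i get this",
    "holy grail", "hg product", "holy grail product",
    "repurchased", "repurchase", "on my third bottle",
    "on my second bottle", "reordered", "auto ship",
    "saved my skin", "changed my skin", "life changing",
    "nothing else works", "only thing that works",
    "game changer", "game-changer",
    "everyone should use", "everyone needs this",
    "i was influenced", "tiktok made me buy",
    "reddit made me buy", "saw it on reddit",
    "everyone keeps mentioning", "always recommended",
    "constantly recommended", "staple in my routine",
    "never going back", "cant live without",
    "can't live without",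
    "overhyped", "over hyped", "is it worth it",
    "worth the hype", "lives up to the hype",
    "fake reviews", "counterfeit", "dupe",
    "ruined my skin", "broke me out",
    "holy grail or scam", "scam or legit",
    "sold out", "back in stock", "sold out everywhere",
    "can't find it", "where is it in stock"]

-- the inner 'for phrase …: if phrase in body: count += 1; break' loop
def pvInnerA : List String → String → Int → Int
  | [], _, count => count
  | phrase :: ps, body, count =>
      if PySem.Str.isIn phrase body then count + 1 else pvInnerA ps body count

def count_intent (comments : List String) : Int :=
  comments.foldl (fun count comment => pvInnerA INTENT_PHRASES (PySem.Str.lower comment) count) 0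

-- ===== PORT B =====
-- B's module-level blobs of phrases, one per block of A's list, split once at load
def PHRASE_BLOBS : List String := [
  "where to buy|where can i buy|where do i buy|where can i find|link?|asin?|amazon link|just ordered|just bought|just purchased|in my cart|added to cart|is this on amazon|sephora link|ulta link|where did you get|what's the amazon link|how do i get this",
  "holy grail|hg product|holy grail product|repurchased|repurchase|on my third bottle|on my second bottle|reordered|auto ship|saved my skin|changed my skin|life changing|nothing else works|only thing that works|game changer",
  "game-changer|everyone should use|everyone needs this|i was influenced|tiktok made me buy|reddit made me buy|saw it on reddit|everyone keeps mentioning|always recommended|constantly recommended|staple in my routine|never going back|cant live without|can't live without",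
  "overhyped|over hyped|is it worth it|worth the hype|lives up to the hype|fake reviews|counterfeit|dupe|ruined my skin|broke me out|holy grail or scam|scam or legit",
  "sold out|back in stock|sold out everywhere|can't find it|where is it in stock"]

-- _BUCKETS.setdefault(p[0], []).append(p) over _PHRASE_BLOB.split("|")
def PHRASE_BUCKETS : PySem.Dict Char (List String) :=
  PHRASE_BLOBS.foldl
    (fun d blob =>
      ((PySem.Chars.splitOn blob.toList "|".toList).map String.ofList).foldl
        (fun d p => d.insert (p.toList.headD ' ') (d.getD (p.toList.headD ' ') [] ++ [p])) d)
    PySem.Dict.empty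

-- the inner 'for j in range(len(body)): if any(body.startswith(p, j) …): total += 1; break'
-- loop, walking the suffixes of body (body.startswith(p, j) = startswith of the j-th suffix)
def pvScanB : List Char → Bool
  | [] => false
  | c :: rest =>
      if (PHRASE_BUCKETS.getD c []).any
           (fun p => PySem.Chars.startswith (c :: rest) p.toList) then true
      else pvScanB rest

def count_intent_alt (comments : List String) : Int :=
  comments.foldl
    (fun total comment =>
      if pvScanB (PySem.Str.lower comment).toList then total + 1 else total) 0

-- ===== PRECONDITION & SPEC =====
def Spec_count_intent (comments : List String) (out : Int) : Prop := out = count_intent_alt comments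
instance (comments : List String) (out : Int) : Decidable (Spec_count_intent comments out) := by unfold Spec_count_intent; infer_instance

-- ===== CLAIM =====
def Claim_equal_count_intent : Prop := ∀ (comments : List String), Dom_count_intent comments → Spec_count_intent comments (count_intent comments)

-- ===== LEMMAS AND PROOFS =====

-- the blobs split into exactly A's phrase list
set_option maxRecDepth 1000000 in
set_option maxHeartbeats 4000000 in
lemma phrases_split :
    PHRASE_BLOBS.flatMap
      (fun blob => (PySem.Chars.splitOn blob.toList "|".toList).map String.ofList)
      = INTENT_PHRASES := by
  decide

-- hence the buckets are a fold over A's list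
lemma buckets_eq :
    PHRASE_BUCKETS = INTENT_PHRASES.foldl
      (fun d p => d.insert (p.toList.headD ' ') (d.getD (p.toList.headD ' ') [] ++ [p]))
      PySem.Dict.empty := by
  rw [← phrases_split, List.foldl_flatMap]; rfl

-- every phrase is a nonempty string
set_option maxRecDepth 100000 in
lemma phrases_ne_nil : ∀ p ∈ INTENT_PHRASES, p.toList ≠ [] := by decide

-- the bucket index's keys, computed
set_option maxRecDepth 1000000 in
lemma bucket_keys :
    PHRASE_BUCKETS.keys = ['w','l','a','j','i','s','u','h','r','o','c','n','g','e','t','f','d','b'] := by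
  rw [buckets_eq]; decide

-- every bucket holds only phrases (checked key by key over the finite key list)
set_option maxRecDepth 1000000 in
lemma mem_bucket_mem_phrases (c : Char) (p : String)
    (hp : p ∈ PHRASE_BUCKETS.getD c []) : p ∈ INTENT_PHRASES := by
  by_cases hc : PHRASE_BUCKETS.contains c = true
  · have hk : c ∈ PHRASE_BUCKETS.keys := (PySem.Dict.contains_iff_mem_keys _ _).mp hc
    rw [bucket_keys] at hk
    rw [buckets_eq] at hp
    fin_cases hk <;> revert p hp <;> decide
  · rw [PySem.Dict.getD_of_not_contains _ _ (by simpa using hc)] at hp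
    simp at hp

-- every phrase is in the bucket of its first character
set_option maxRecDepth 1000000 in
lemma phrase_mem_bucket : ∀ p ∈ INTENT_PHRASES,
    p ∈ PHRASE_BUCKETS.getD (p.toList.headD ' ') [] := by
  rw [buckets_eq]; decide

-- the position-major scan finds a phrase iff some phrase occurs as an infix
lemma scanB_iff (body : List Char) :
    pvScanB body = true ↔ ∃ p ∈ INTENT_PHRASES, p.toList <:+: body := by
  induction body with
  | nil =>
      simp only [pvScanB]
      constructor
      · intro h; exact absurd h (by decide)
      · rintro ⟨p, hp, hinf⟩
        exact absurd (List.eq_nil_of_infix_nil hinf) (phrases_ne_nil p hp)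
  | cons c rest ih =>
      simp only [pvScanB]
      split_ifs with hhit
      · simp only [true_iff]
        rw [List.any_eq_true] at hhit
        obtain ⟨p, hp, hpre⟩ := hhit
        exact ⟨p, mem_bucket_mem_phrases c p hp,
          ((PySem.Chars.startswith_iff _ _).mp hpre).isInfix⟩
      · rw [ih]
        constructor
        · rintro ⟨p, hp, hinf⟩; exact ⟨p, hp, List.infix_cons hinf⟩
        · rintro ⟨p, hp, hinf⟩
          rcases List.infix_cons_iff.mp hinf with hpre | hsuf
          · exfalso
            apply hhit
            rw [List.any_eq_true]
            refine ⟨p, ?_, (PySem.Chars.startswith_iff _ _).mpr hpre⟩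
            have hne := phrases_ne_nil p hp
            have hd : p.toList.headD ' ' = c := by
              cases hlist : p.toList with
              | nil => exact absurd hlist hne
              | cons x xs =>
                  rw [hlist] at hpre
                  obtain ⟨t, ht⟩ := hpre
                  simp only [List.cons_append] at ht
                  cases ht
                  simp
            have := phrase_mem_bucket p hp
            rwa [hd] at this
          · exact ⟨p, hp, hsuf⟩

-- A's inner loop counts 1 iff some phrase is a substring of body
lemma innerA_eq (ps : List String) (body : String) (count : Int) :
    pvInnerA ps body count =
      if ps.any (fun p => PySem.Str.isIn p body) then count + 1 else count := by
  induction ps with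
  | nil => simp [pvInnerA]
  | cons p ps ih =>
      simp only [pvInnerA, List.any_cons]
      split_ifs with h1 h2 h2 <;> simp_all

-- per-comment agreement
lemma step_eq (count : Int) (comment : String) :
    pvInnerA INTENT_PHRASES (PySem.Str.lower comment) count =
      if pvScanB (PySem.Str.lower comment).toList then count + 1 else count := by
  rw [innerA_eq]
  congr 1
  rw [Bool.eq_iff_iff, List.any_eq_true, scanB_iff]
  simp [PySem.Str.isIn_eq, PySem.Chars.isIn_iff_infix]

-- ===== VERDICT =====
theorem count_intent_spec : Claim_equal_count_intent := by
  intro comments _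
  unfold Spec_count_intent count_intent count_intent_alt
  simp only [step_eq]
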